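-- pv_equiv track=rewrite | github.com/keijunkuma/tokushusagi | aaa/zero.py | has_thirty_consecutive_zeros
-- ===== SOURCE A (Python) =====
-- def has_thirty_consecutive_zeros(input_list):
--     """
--     リストに0が30個以上連続して含まれているか判定します。
--
--     Args:
--         input_list: 判定するリスト。
--
--     Returns:
--         0が30個以上連続して存在する場合はTrue、そうでない場合はFalse。
--     """
--     count = 0
--     for item in input_list:
--         if item == 0:
--             count += 1
--             if count >= 30:
--                 return True
--         else:
--             count = 0
--     return False
-- ===== SOURCE B (Python) =====
-- def has_thirty_consecutive_zeros(input_list):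
--     # Run-scanning: on meeting a zero, measure the whole maximal zero run at once
--     # and decide on its length; no per-element counter is maintained.
--     i = 0
--     n = len(input_list)
--     while i < n:
--         if input_list[i] == 0:
--             j = i + 1
--             while j < n and input_list[j] == 0:
--                 j += 1
--             if j - i >= 30:
--                 return True
--             i = j
--         else:
--             i += 1
--     return False
-- ===== Notes on version B (the rewrite author's own statement) =====
-- stated objective: alternative
-- what changed: Replaces the per-element counter with a run decomposition: skip each maximal non-zero run, measure each maximal zero run with an inner scan, and decide on the run length.
import Mathlib
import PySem

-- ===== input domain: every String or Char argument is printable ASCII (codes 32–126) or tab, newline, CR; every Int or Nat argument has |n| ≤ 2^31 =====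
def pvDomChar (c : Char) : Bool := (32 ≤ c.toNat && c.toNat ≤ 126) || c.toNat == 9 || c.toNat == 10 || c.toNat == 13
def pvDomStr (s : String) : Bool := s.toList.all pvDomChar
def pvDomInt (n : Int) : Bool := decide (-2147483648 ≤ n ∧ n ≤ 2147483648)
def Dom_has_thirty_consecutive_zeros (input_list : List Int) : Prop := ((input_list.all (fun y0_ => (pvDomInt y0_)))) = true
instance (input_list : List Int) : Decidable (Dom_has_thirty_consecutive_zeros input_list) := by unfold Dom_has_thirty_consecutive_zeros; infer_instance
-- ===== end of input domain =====

-- B replaces A's per-element counter with a run decomposition (measure each maximal zero run at once); same O(n) cost, return value proved equal.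

-- ===== PORT A =====
-- A's for-loop with the early `return True`, as structural recursion with the counter as state.
def pvAGo : List Int → Int → Bool
  | [], _ => false
  | item :: rest, count =>
    if item == 0 then
      if 30 ≤ count + 1 then true else pvAGo rest (count + 1)
    else pvAGo rest 0

def has_thirty_consecutive_zeros (input_list : List Int) : Bool := pvAGo input_list 0

-- ===== PORT B =====
-- B's outer while-loop as recursion on the list suffix: on a zero, measure the
-- maximal zero run (B's inner `while j < n and input_list[j] == 0` scan =
-- takeWhile, and `i = j` = dropWhile), decide on its length; else step one element.
def pvBGo : List Int → Bool
  | [] => false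
  | x :: xs =>
    if x == 0 then
      if 30 ≤ 1 + (xs.takeWhile (fun a : Int => a == 0)).length then true
      else pvBGo (xs.dropWhile (fun a : Int => a == 0))
    else pvBGo xs
termination_by l => l.length
decreasing_by
  · have := List.length_dropWhile_le (fun a : Int => a == 0) xs
    simp; omega
  · simp

def has_thirty_consecutive_zeros_alt (input_list : List Int) : Bool := pvBGo input_list

-- ===== PRECONDITION & SPEC =====
def Spec_has_thirty_consecutive_zeros (input_list : List Int) (out : Bool) : Prop := out = has_thirty_consecutive_zeros_alt input_list
instance (input_list : List Int) (out : Bool) : Decidable (Spec_has_thirty_consecutive_zeros input_list out) := by unfold Spec_has_thirty_consecutive_zeros; infer_instance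

-- ===== CLAIM (what is proved, stated in full; the proofs are below) =====
def Claim_equal_has_thirty_consecutive_zeros : Prop := ∀ (input_list : List Int), Dom_has_thirty_consecutive_zeros input_list → Spec_has_thirty_consecutive_zeros input_list (has_thirty_consecutive_zeros input_list)

-- ===== LEMMAS AND PROOFS =====

-- one step of pvBGo in takeWhile/dropWhile form
theorem pvBGo_eq (l : List Int) :
    pvBGo l = (decide (30 ≤ (l.takeWhile (fun a : Int => a == 0)).length)
      || pvBGo (l.dropWhile (fun a : Int => a == 0))) := by
  cases l with
  | nil => simp [pvBGo]
  | cons x xs =>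
    by_cases hx : x = 0
    · subst hx
      rw [pvBGo]
      simp only [beq_self_eq_true, if_true, List.takeWhile_cons_of_pos, List.dropWhile_cons_of_pos,
        List.length_cons]
      split_ifs with h
      · simp; omega
      · have h2 : ¬ (30 ≤ (xs.takeWhile (fun a : Int => a == 0)).length + 1) := by omega
        simp [h2]
    · have hz : ((x == 0) : Bool) = false := by simp [hx]
      rw [pvBGo]
      rw [List.takeWhile_cons_of_neg (by simp [hx]), List.dropWhile_cons_of_neg (by simp [hx])]
      conv_rhs => rw [pvBGo]
      simp [hz]

-- main invariant: A's counter loop against B's run decomposition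
theorem pvMain : ∀ (n : Nat) (l : List Int), l.length ≤ n → ∀ (c : Int), 0 ≤ c → c < 30 →
    pvAGo l c = (decide ((30:Int) ≤ c + ((l.takeWhile (fun a : Int => a == 0)).length : Int))
      || pvBGo (l.dropWhile (fun a : Int => a == 0))) := by
  intro n
  induction n with
  | zero =>
    intro l hl c hc0 hc30
    have he : l = [] := List.length_eq_zero_iff.mp (Nat.le_zero.mp hl)
    subst he
    simp [pvAGo, pvBGo]; omega
  | succ m ih =>
    intro l hl c hc0 hc30
    cases l with
    | nil => simp [pvAGo, pvBGo]; omega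
    | cons x xs =>
      have hlen : xs.length ≤ m := by simpa using Nat.lt_succ_iff.mp (by simpa using hl)
      by_cases hx : x = 0
      · subst hx
        rw [pvAGo]
        simp only [beq_self_eq_true, if_true, List.takeWhile_cons_of_pos,
          List.dropWhile_cons_of_pos, List.length_cons]
        split_ifs with h
        · simp only [Bool.true_eq, Bool.or_eq_true, decide_eq_true_eq]
          left; push_cast; omega
        · rw [ih xs hlen (c+1) (by omega) (by omega)]
          congr 1
          apply decide_eq_decide.mpr
          push_cast; omega
      · have hz : ((x == 0) : Bool) = false := by simp [hx]
        rw [pvAGo]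
        rw [List.takeWhile_cons_of_neg (by simp [hx]), List.dropWhile_cons_of_neg (by simp [hx])]
        simp only [hz, Bool.false_eq_true, if_false, List.length_nil]
        have hstep : pvBGo (x :: xs) = pvBGo xs := by
          conv_lhs => rw [pvBGo]
          simp [hz]
        rw [ih xs hlen 0 le_rfl (by omega), hstep, pvBGo_eq xs]
        simp only [Nat.cast_zero, add_zero, zero_add]
        rw [decide_eq_false (show ¬ ((30:Int) ≤ c) by omega), Bool.false_or]
        congr 1
        apply decide_eq_decide.mpr
        omega

-- ===== VERDICT (by name: the statement is the Claim_ definition above) =====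
theorem has_thirty_consecutive_zeros_spec : Claim_equal_has_thirty_consecutive_zeros := by
  intro l _
  unfold Spec_has_thirty_consecutive_zeros has_thirty_consecutive_zeros has_thirty_consecutive_zeros_alt
  rw [pvMain l.length l le_rfl 0 le_rfl (by omega)]
  conv_rhs => rw [pvBGo_eq l]
  congr 1
  apply decide_eq_decide.mpr
  omega
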